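-- pv_equiv track=rewrite | github.com/guri-amsa-bridge/vibe-coding-improvement-ai-adea | agents/architecture_mapper.py | resolve_python_import
-- ===== SOURCE A (Python) =====
-- def resolve_python_import(module_name, source_files, root_dir):
--     """Python 모듈명을 프로젝트 내 파일 경로로 변환한다."""
--     # 모듈명의 . 을 / 로 변환
--     path_candidates = [
--         module_name.replace('.', '/') + '.py',
--         module_name.replace('.', '/') + '/__init__.py',
--     ]
--     # 부분 매칭: a.b.c → a/b/c.py, a/b.py, a.py (상위 모듈도 의존성)
--     parts = module_name.split('.')
--     for i in range(len(parts), 0, -1):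
--         partial = '/'.join(parts[:i]) + '.py'
--         if partial not in path_candidates:
--             path_candidates.append(partial)
--         partial_init = '/'.join(parts[:i]) + '/__init__.py'
--         if partial_init not in path_candidates:
--             path_candidates.append(partial_init)
--
--     for candidate in path_candidates:
--         if candidate in source_files:
--             return candidate
--     return None
-- ===== SOURCE B (Python) =====
-- def resolve_python_import(module_name, source_files, root_dir):
--     """Python 모듈명을 프로젝트 내 파일 경로로 변환한다."""
--     # Single interleaved pass: probe each candidate against source_files as soon
--     # as it is formed, longest prefix first, instead of materialising and
--     # deduplicating a candidate list and scanning it afterwards.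
--     parts = module_name.split('.')
--     for i in range(len(parts), 0, -1):
--         prefix = '/'.join(parts[:i])
--         if prefix + '.py' in source_files:
--             return prefix + '.py'
--         if prefix + '/__init__.py' in source_files:
--             return prefix + '/__init__.py'
--     return None
-- ===== Notes on version B (the rewrite author's own statement) =====
-- stated objective: simpler
-- what changed: A materialises a candidate list (two explicit leading candidates plus a dedup-guarded building loop) and then scans it against source_files in a second pass; B fuses everything into one loop over prefix lengths that probes each of the two candidate forms immediately and returns the first hit, dropping the list, the dedup membership checks and the two redundant leading candidates entirely.
import Mathlib
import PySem

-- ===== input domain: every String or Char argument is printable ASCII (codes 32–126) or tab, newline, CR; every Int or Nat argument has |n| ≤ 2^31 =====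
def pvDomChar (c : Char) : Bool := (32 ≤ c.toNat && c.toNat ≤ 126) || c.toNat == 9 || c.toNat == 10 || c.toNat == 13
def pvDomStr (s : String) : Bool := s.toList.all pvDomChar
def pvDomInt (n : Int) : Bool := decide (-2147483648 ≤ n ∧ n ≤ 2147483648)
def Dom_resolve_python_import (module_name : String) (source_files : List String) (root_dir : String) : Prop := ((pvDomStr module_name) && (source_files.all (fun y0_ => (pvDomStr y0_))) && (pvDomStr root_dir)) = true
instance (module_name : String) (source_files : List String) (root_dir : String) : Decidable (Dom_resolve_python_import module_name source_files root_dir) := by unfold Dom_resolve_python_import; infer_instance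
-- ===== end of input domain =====

-- B fuses A's build-list-then-scan (with its dedup guards and two redundant leading candidates) into one loop that probes each candidate immediately; same probe order, same result.


-- ===== PORT A =====
-- body of A's candidate-building loop: append 'partial' and 'partial_init' each guarded by the 'not in' dedup check
def aStep (parts : List String) (acc : List String) (i : Int) : List String :=
  let part := PySem.Str.join "/" (PySem.List.slice parts none (some i)) ++ ".py"
  let acc1 := if acc.contains part then acc else acc ++ [part]
  let partInit := PySem.Str.join "/" (PySem.List.slice parts none (some i)) ++ "/__init__.py"
  if acc1.contains partInit then acc1 else acc1 ++ [partInit]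

def resolve_python_import (module_name : String) (source_files : List String) (root_dir : String) : Option String :=
  let path_candidates : List String :=
    [PySem.Str.replace module_name "." "/" ++ ".py",
     PySem.Str.replace module_name "." "/" ++ "/__init__.py"]
  -- module_name.split('.'): the separator "." is nonempty, so split? is always `some` here
  let parts : List String := (PySem.Str.split? module_name ".").getD []
  let path_candidates :=
    (PySem.List.pyRange (parts.length : Int) 0 (-1)).foldl (aStep parts) path_candidates
  path_candidates.find? (fun candidate => source_files.contains candidate)

-- ===== PORT B =====
-- B's single loop over the range list: probe prefix+'.py' then prefix+'/__init__.py', return the first hit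
def bGo (parts : List String) (source_files : List String) : List Int → Option String
  | [] => none
  | i :: rest =>
    let pre := PySem.Str.join "/" (PySem.List.slice parts none (some i))
    if source_files.contains (pre ++ ".py") then some (pre ++ ".py")
    else if source_files.contains (pre ++ "/__init__.py") then some (pre ++ "/__init__.py")
    else bGo parts source_files rest

def resolve_python_import_alt (module_name : String) (source_files : List String) (root_dir : String) : Option String :=
  let parts : List String := (PySem.Str.split? module_name ".").getD []
  bGo parts source_files (PySem.List.pyRange (parts.length : Int) 0 (-1))

-- ===== PRECONDITION & SPEC =====
def Spec_resolve_python_import (module_name : String) (source_files : List String) (root_dir : String) (out : Option String) : Prop := out = resolve_python_import_alt module_name source_files root_dir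
instance (module_name : String) (source_files : List String) (root_dir : String) (out : Option String) : Decidable (Spec_resolve_python_import module_name source_files root_dir out) := by unfold Spec_resolve_python_import; infer_instance

-- ===== CLAIM (what is proved, stated in full; the proofs are below) =====
def Claim_equal_resolve_python_import : Prop := ∀ (module_name : String) (source_files : List String) (root_dir : String), Dom_resolve_python_import module_name source_files root_dir → Spec_resolve_python_import module_name source_files root_dir (resolve_python_import module_name source_files root_dir)

-- ===== LEMMAS AND PROOFS =====

-- proof-side helpers: the two candidate strings produced for prefix length i
def candPy (parts : List String) (i : Int) : String :=
  PySem.Str.join "/" (PySem.List.slice parts none (some i)) ++ ".py"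
def candInit (parts : List String) (i : Int) : String :=
  PySem.Str.join "/" (PySem.List.slice parts none (some i)) ++ "/__init__.py"

-- replacing '.' by '/' character-wise
def subDot (c : Char) : Char := if c = '.' then '/' else c

-- fuel-free form of PySem.Chars.splitOn.go at separator ['.']
def pureSplit : List Char → List Char → List (List Char)
  | [], cur => [cur.reverse]
  | c :: t, cur => if c = '.' then cur.reverse :: pureSplit t [] else pureSplit t (c :: cur)

theorem pureSplit_ne_nil (l cur : List Char) : ∃ y ys, pureSplit l cur = y :: ys := by
  induction l generalizing cur with
  | nil => exact ⟨cur.reverse, [], rfl⟩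
  | cons c t ih =>
    by_cases h : c = '.'
    · exact ⟨cur.reverse, pureSplit t [], by simp [pureSplit, h]⟩
    · obtain ⟨y, ys, hy⟩ := ih (c :: cur)
      exact ⟨y, ys, by simp [pureSplit, h, hy]⟩

theorem splitOn_go_eq (fuel : Nat) : ∀ (l cur : List Char) (acc : List (List Char)),
    l.length ≤ fuel →
    PySem.Chars.splitOn.go ['.'] fuel l cur acc = acc.reverse ++ pureSplit l cur := by
  induction fuel with
  | zero =>
    intro l cur acc h
    have hl : l = [] := by cases l <;> simp at h ⊢
    subst hl
    rw [PySem.Chars.splitOn.go]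
    simp [pureSplit]
  | succ f ih =>
    intro l cur acc h
    cases l with
    | nil =>
      rw [PySem.Chars.splitOn.go]
      · simp [pureSplit]
      · omega
    | cons c t =>
      rw [PySem.Chars.splitOn.go]
      by_cases hc : c = '.'
      · have hpre : ['.'].isPrefixOf (c :: t) = true := by simp [List.isPrefixOf, hc]
        rw [if_pos hpre]
        have : List.drop (['.'].length) (c :: t) = t := by simp
        rw [this, ih t [] (cur.reverse :: acc) (by simpa using Nat.le_of_succ_le_succ h)]
        simp [pureSplit, hc]
      · have hpre : ['.'].isPrefixOf (c :: t) = false := by simp [List.isPrefixOf, Ne.symm hc]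
        rw [if_neg (by simp [hpre])]
        rw [ih t (c :: cur) acc (by simpa using Nat.le_of_succ_le_succ h)]
        simp [pureSplit, hc]

theorem splitOn_dot_eq (cs : List Char) : PySem.Chars.splitOn cs ['.'] = pureSplit cs [] := by
  have := splitOn_go_eq (cs.length + 1) cs [] [] (by omega)
  simpa [PySem.Chars.splitOn] using this

theorem replace_go_eq (fuel : Nat) : ∀ (l acc : List Char),
    l.length ≤ fuel →
    PySem.Chars.replace.go ['.'] ['/'] fuel l acc = acc.reverse ++ l.map subDot := by
  induction fuel with
  | zero =>
    intro l acc h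
    have hl : l = [] := by cases l <;> simp at h ⊢
    subst hl
    rw [PySem.Chars.replace.go]
    simp
  | succ f ih =>
    intro l acc h
    cases l with
    | nil =>
      rw [PySem.Chars.replace.go]
      · simp
      · omega
    | cons c t =>
      rw [PySem.Chars.replace.go]
      by_cases hc : c = '.'
      · have hpre : ['.'].isPrefixOf (c :: t) = true := by simp [List.isPrefixOf, hc]
        rw [if_pos hpre]
        have : List.drop (['.'].length) (c :: t) = t := by simp
        rw [this, ih t (['/'].reverse ++ acc) (by simpa using Nat.le_of_succ_le_succ h)]
        simp [subDot, hc]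
      · have hpre : ['.'].isPrefixOf (c :: t) = false := by simp [List.isPrefixOf, Ne.symm hc]
        rw [if_neg (by simp [hpre])]
        rw [ih t (c :: acc) (by simpa using Nat.le_of_succ_le_succ h)]
        simp [subDot, hc]

theorem replace_dot_eq (cs : List Char) :
    PySem.Chars.replace cs ['.'] ['/'] = cs.map subDot := by
  have : (['.'] : List Char).isEmpty = false := rfl
  rw [PySem.Chars.replace]
  simp only [this, Bool.false_eq_true, if_false]
  simpa using replace_go_eq cs.length cs [] (le_refl _)

theorem join_pureSplit (l cur : List Char) :
    PySem.Chars.join ['/'] (pureSplit l cur) = cur.reverse ++ l.map subDot := by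
  induction l generalizing cur with
  | nil => simp [pureSplit, PySem.Chars.join_singleton]
  | cons c t ih =>
    by_cases hc : c = '.'
    · obtain ⟨y, ys, hy⟩ := pureSplit_ne_nil t []
      rw [show pureSplit (c :: t) cur = cur.reverse :: pureSplit t [] by simp [pureSplit, hc]]
      rw [hy, PySem.Chars.join_cons_cons, ← hy, ih []]
      simp [subDot, hc]
    · rw [show pureSplit (c :: t) cur = pureSplit t (c :: cur) by simp [pureSplit, hc]]
      rw [ih (c :: cur)]
      simp [subDot, hc]

theorem join_splitOn_dot (cs : List Char) :
    PySem.Chars.join ['/'] (PySem.Chars.splitOn cs ['.']) = PySem.Chars.replace cs ['.'] ['/'] := by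
  rw [splitOn_dot_eq, replace_dot_eq, join_pureSplit]
  simp

-- the parts list A and B compute
theorem parts_eq (mn : String) :
    (PySem.Str.split? mn ".").getD [] =
      (PySem.Chars.splitOn mn.toList ['.']).map String.ofList := by
  have hdot : ("." : String).toList = ['.'] := rfl
  simp [PySem.Str.split?, PySem.Chars.split?, hdot]

theorem parts_length_pos (mn : String) :
    0 < ((PySem.Str.split? mn ".").getD []).length := by
  rw [parts_eq]
  obtain ⟨y, ys, hy⟩ := pureSplit_ne_nil mn.toList []
  simp [splitOn_dot_eq, hy]

-- the full-length prefix candidate coincides with A's replace-based candidate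
theorem join_full (mn : String) :
    PySem.Str.join "/" (PySem.List.slice ((PySem.Str.split? mn ".").getD []) none
        (some ((((PySem.Str.split? mn ".").getD []).length : Nat) : Int))) =
      PySem.Str.replace mn "." "/" := by
  rw [PySem.List.slice_to_natCast, List.take_length]
  rw [parts_eq]
  have hdot : ("." : String).toList = ['.'] := rfl
  have hsl : ("/" : String).toList = ['/'] := rfl
  rw [PySem.Str.join, PySem.Str.replace, hdot, hsl]
  congr 1
  rw [List.map_map]
  have : (String.toList ∘ String.ofList) = id := by
    funext l; simp
  rw [this, List.map_id]
  exact join_splitOn_dot mn.toList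

-- dedup-guarded append does not change the first match
theorem find?_dedup_append (p : String → Bool) (acc : List String) (x : String) :
    List.find? p (if acc.contains x then acc else acc ++ [x]) = List.find? p (acc ++ [x]) := by
  by_cases h : acc.contains x
  · rw [if_pos h, List.find?_append]
    cases hf : List.find? p acc with
    | some y => simp
    | none =>
      have hx : p x = false := by
        have := List.find?_eq_none.mp hf x (by simpa using h)
        simpa using this
      simp [List.find?, hx]
  · rw [if_neg h]

theorem find?_aStep (p : String → Bool) (parts acc : List String) (i : Int) :
    List.find? p (aStep parts acc i) =
      List.find? p (acc ++ [candPy parts i, candInit parts i]) := by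
  show List.find? p
      (if (if acc.contains (candPy parts i) then acc else acc ++ [candPy parts i]).contains (candInit parts i)
       then (if acc.contains (candPy parts i) then acc else acc ++ [candPy parts i])
       else (if acc.contains (candPy parts i) then acc else acc ++ [candPy parts i]) ++ [candInit parts i]) = _
  rw [find?_dedup_append, List.find?_append, find?_dedup_append, List.find?_append,
    List.find?_append]
  cases hf : p (candPy parts i) <;> cases hg : p (candInit parts i) <;>
    simp [List.find?, hf, hg]

theorem find?_foldl_aStep (p : String → Bool) (parts : List String) (R : List Int) :
    ∀ acc : List String,
    List.find? p (R.foldl (aStep parts) acc) =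
      List.find? p (acc ++ R.flatMap (fun i => [candPy parts i, candInit parts i])) := by
  induction R with
  | nil => intro acc; simp
  | cons i R ih =>
    intro acc
    rw [List.foldl_cons, ih, List.find?_append, find?_aStep, List.find?_append,
      List.flatMap_cons, ← List.append_assoc, List.find?_append, List.find?_append,
      Option.or_assoc]

theorem bGo_eq_find? (parts source_files : List String) (R : List Int) :
    bGo parts source_files R =
      List.find? (fun c => source_files.contains c)
        (R.flatMap (fun i => [candPy parts i, candInit parts i])) := by
  induction R with
  | nil => simp [bGo]
  | cons i R ih =>
    rw [List.flatMap_cons, List.find?_append, ← ih]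
    show (if source_files.contains (candPy parts i) then some (candPy parts i)
          else if source_files.contains (candInit parts i) then some (candInit parts i)
          else bGo parts source_files R) = _
    by_cases h1 : candPy parts i ∈ source_files <;>
      by_cases h2 : candInit parts i ∈ source_files <;>
        simp [List.find?, h1, h2]

-- ===== VERDICT (by name: the statement is the Claim_ definition above) =====
theorem resolve_python_import_spec : Claim_equal_resolve_python_import := by
  intro mn sf rd _
  show resolve_python_import mn sf rd = resolve_python_import_alt mn sf rd
  simp only [resolve_python_import, resolve_python_import_alt]
  set parts : List String := (PySem.Str.split? mn ".").getD [] with hparts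
  have hn : 0 < parts.length := parts_length_pos mn
  have hrange : PySem.List.pyRange (parts.length : Int) 0 (-1)
      = (parts.length : Int) :: PySem.List.pyRange ((parts.length : Int) - 1) 0 (-1) :=
    PySem.List.pyRange_neg_one_cons (by exact_mod_cast hn)
  rw [find?_foldl_aStep, bGo_eq_find?, hrange, List.flatMap_cons]
  have hc1 : candPy parts (parts.length : Int) = PySem.Str.replace mn "." "/" ++ ".py" := by
    unfold candPy
    rw [hparts, join_full]
  have hc2 : candInit parts (parts.length : Int)
      = PySem.Str.replace mn "." "/" ++ "/__init__.py" := by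
    unfold candInit
    rw [hparts, join_full]
  rw [← hc1, ← hc2]
  simp only [List.find?_append]
  cases List.find? (fun candidate => sf.contains candidate)
      [candPy parts (parts.length : Int), candInit parts (parts.length : Int)] <;> simp
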